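-- pv_equiv track=rewrite | github.com/shanemcd/gameplan-cli | cli/agenda.py | _parse_logbook
-- ===== SOURCE A (Python) =====
-- from typing import Dict, Any, List, Optional, Tuple
--
-- def _parse_logbook(content: str) -> Dict[str, Dict[str, List[str]]]:
--     """Parse existing LOGBOOK.md into structured data.
--
--     Args:
--         content: LOGBOOK.md content
--
--     Returns:
--         Dict mapping week_start -> initiative -> list of tasks
--     """
--     entries: Dict[str, Dict[str, List[str]]] = {}
--     current_week: Optional[str] = None
--     current_initiative: Optional[str] = None
--
--     for line in content.split('\n'):
--         # Week heading: ## Week of YYYY-MM-DD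
--         if line.startswith('## Week of '):
--             week_date = line.replace('## Week of ', '').strip()
--             current_week = week_date
--             current_initiative = None
--             if current_week not in entries:
--                 entries[current_week] = {}
--
--         # Initiative heading: ### ISSUE-KEY (Title) or ### Other
--         elif line.startswith('### ') and current_week:
--             current_initiative = line.replace('### ', '').strip()
--             if current_initiative not in entries[current_week]:
--                 entries[current_week][current_initiative] = []
--
--         # Task line
--         elif line.startswith('- [x]') and current_week and current_initiative:
--             entries[current_week][current_initiative].append(line)
--
--     return entries
-- ===== SOURCE B (Python) =====
-- from typing import Dict, List, Tuple
--
--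
-- def _blocks(lines: List[str], prefix: str) -> List[Tuple[str, List[str]]]:
--     """Split lines into (header, body) blocks at lines starting with prefix;
--     lines before the first header are dropped."""
--     out = []
--     i, n = 0, len(lines)
--     while i < n:
--         if lines[i].startswith(prefix):
--             j = i + 1
--             while j < n and not lines[j].startswith(prefix):
--                 j += 1
--             out.append((lines[i], lines[i + 1:j]))
--             i = j
--         else:
--             i += 1
--     return out
--
--
-- def _parse_logbook(content: str) -> Dict[str, Dict[str, List[str]]]:
--     """Parse LOGBOOK.md into week -> initiative -> completed-task lines."""
--     entries: Dict[str, Dict[str, List[str]]] = {}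
--     for header, body in _blocks(content.split('\n'), '## Week of '):
--         week_dict = entries.setdefault(header.replace('## Week of ', '').strip(), {})
--         for iheader, ibody in _blocks(body, '### '):
--             tasks = week_dict.setdefault(iheader.replace('### ', '').strip(), [])
--             tasks.extend(l for l in ibody if l.startswith('- [x]'))
--     return entries
-- ===== Notes on version B (the rewrite author's own statement) =====
-- stated objective: alternative
-- what changed: B replaces A's flat stateful line loop (current_week/current_initiative state) with hierarchical grouping: a _blocks helper partitions the lines into week blocks and each body into initiative blocks, merged into the result via setdefault; Pre_ excludes contents containing a heading with an empty name ('## Week of ' or '### ' followed only by whitespace), a degenerate corner where A registers the heading but skips its content via falsy-string checks while B treats it as an ordinary empty-string name.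
-- outside the precondition, e.g. on _parse_logbook('## Week of \n### A\n- [x] t'): A returns {'': {}}, B returns {'': {'A': ['- [x] t']}}; on _parse_logbook('## Week of '): A returns {'': {}}, B returns {'': {}}; on _parse_logbook('### '): A returns {}, B returns {}
import Mathlib
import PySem

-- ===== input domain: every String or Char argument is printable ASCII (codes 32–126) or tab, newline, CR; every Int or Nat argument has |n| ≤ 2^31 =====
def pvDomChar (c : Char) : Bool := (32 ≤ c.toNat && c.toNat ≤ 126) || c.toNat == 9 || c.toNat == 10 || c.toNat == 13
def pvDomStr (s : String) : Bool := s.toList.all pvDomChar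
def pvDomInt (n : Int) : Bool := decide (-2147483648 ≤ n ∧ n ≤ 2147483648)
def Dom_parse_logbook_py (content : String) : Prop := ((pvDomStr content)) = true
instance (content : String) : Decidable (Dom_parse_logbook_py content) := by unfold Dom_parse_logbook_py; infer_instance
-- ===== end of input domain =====

-- B rebuilds the result by hierarchical grouping (week blocks, then initiative blocks) instead of A's
-- flat stateful line loop; same O(n) cost, different decomposition (objective: alternative).

-- ===== PORT A =====
-- Python truthiness of an Optional[str]: not None and not "".
def pvTruthy (o : Option String) : Bool :=
  match o with
  | none => false
  | some s => s != ""

-- one iteration of A's for-loop; state = (entries, current_week, current_initiative)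
def pvStepA
    (st : PySem.Dict String (PySem.Dict String (List String)) × Option String × Option String)
    (line : String) :
    PySem.Dict String (PySem.Dict String (List String)) × Option String × Option String :=
  let entries := st.1
  let cw := st.2.1
  let ci := st.2.2
  if PySem.Str.startswith line "## Week of " then
    let wk := PySem.Str.strip (PySem.Str.replace line "## Week of " "")
    let entries := if entries.contains wk then entries else entries.insert wk PySem.Dict.empty
    (entries, some wk, none)
  else if PySem.Str.startswith line "### " && pvTruthy cw then
    let w := cw.getD ""
    let ini := PySem.Str.strip (PySem.Str.replace line "### " "")
    let wd := entries.getD w PySem.Dict.empty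
    let entries := if wd.contains ini then entries else entries.insert w (wd.insert ini [])
    (entries, cw, some ini)
  else if PySem.Str.startswith line "- [x]" && pvTruthy cw && pvTruthy ci then
    let w := cw.getD ""
    let i := ci.getD ""
    let wd := entries.getD w PySem.Dict.empty
    let entries := entries.insert w (wd.insert i (wd.getD i [] ++ [line]))
    (entries, cw, ci)
  else
    st

def parse_logbook_py (content : String) : List (String × List (String × List String)) :=
  ((((PySem.Str.split? content "\n").getD []).foldl pvStepA
      (PySem.Dict.empty, none, none)).1).items.map (fun p => (p.1, p.2.items))

-- ===== PORT B =====
-- _blocks: split lines into (header, body) blocks at lines starting with pfx (preamble dropped)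
def pvBlocks (pfx : String) : List String → List (String × List String)
  | [] => []
  | l :: ls =>
    if PySem.Str.startswith l pfx then
      (l, ls.takeWhile (fun x => !PySem.Str.startswith x pfx))
        :: pvBlocks pfx (ls.dropWhile (fun x => !PySem.Str.startswith x pfx))
    else pvBlocks pfx ls
termination_by ls => ls.length
decreasing_by
  · exact Nat.lt_succ_of_le (List.length_dropWhile_le _ _)
  · simp

def pvInnerStep (wd : PySem.Dict String (List String)) (blk : String × List String) :
    PySem.Dict String (List String) :=
  let ini := PySem.Str.strip (PySem.Str.replace blk.1 "### " "")
  let wd := wd.setdefault ini []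
  wd.insert ini (wd.getD ini [] ++ blk.2.filter (fun l => PySem.Str.startswith l "- [x]"))

def pvOuterStep (e : PySem.Dict String (PySem.Dict String (List String)))
    (blk : String × List String) : PySem.Dict String (PySem.Dict String (List String)) :=
  let wk := PySem.Str.strip (PySem.Str.replace blk.1 "## Week of " "")
  let e := e.setdefault wk PySem.Dict.empty
  e.insert wk ((pvBlocks "### " blk.2).foldl pvInnerStep (e.getD wk PySem.Dict.empty))

def parse_logbook_py_alt (content : String) : List (String × List (String × List String)) :=
  ((pvBlocks "## Week of " ((PySem.Str.split? content "\n").getD [])).foldl pvOuterStep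
      PySem.Dict.empty).items.map (fun p => (p.1, p.2.items))

-- ===== PRECONDITION & SPEC =====
-- Pre_ excludes contents containing a heading with an empty name ('## Week of ' or '### '
-- followed only by whitespace): a degenerate corner where A registers the heading but then skips
-- its content via falsy-string checks, while B treats it as an ordinary empty-string name.
def Pre_parse_logbook_py (content : String) : Prop :=
  ∀ l ∈ (PySem.Str.split? content "\n").getD [],
    (PySem.Str.startswith l "## Week of " = true →
      PySem.Str.strip (PySem.Str.replace l "## Week of " "") ≠ "") ∧
    (PySem.Str.startswith l "### " = true →
      PySem.Str.strip (PySem.Str.replace l "### " "") ≠ "")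
instance (content : String) : Decidable (Pre_parse_logbook_py content) := by
  unfold Pre_parse_logbook_py; infer_instance

def pvWitness_parse_logbook_py : String :=
  "## Week of 2024-01-01\n### PROJ-1 (Title)\n- [x] did a thing"

def Spec_parse_logbook_py (content : String) (out : List (String × List (String × List String))) : Prop := out = parse_logbook_py_alt content
instance (content : String) (out : List (String × List (String × List String))) : Decidable (Spec_parse_logbook_py content out) := by unfold Spec_parse_logbook_py; infer_instance

-- ===== CLAIM (what is proved, stated in full; the proofs are below) =====
def Claim_equal_parse_logbook_py : Prop := ∀ (content : String), Dom_parse_logbook_py content → Pre_parse_logbook_py content → Spec_parse_logbook_py content (parse_logbook_py content)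

-- ===== LEMMAS AND PROOFS =====

-- unfolding equations for pvBlocks
theorem pvBlocks_cons_pos (pfx l : String) (ls : List String)
    (h : PySem.Str.startswith l pfx = true) :
    pvBlocks pfx (l :: ls) =
      (l, ls.takeWhile (fun x => !PySem.Str.startswith x pfx))
        :: pvBlocks pfx (ls.dropWhile (fun x => !PySem.Str.startswith x pfx)) := by
  rw [pvBlocks]; simp only [PySem.Str.startswith_eq] at h ⊢; simp [h]

theorem pvBlocks_cons_neg (pfx l : String) (ls : List String)
    (h : PySem.Str.startswith l pfx = false) :
    pvBlocks pfx (l :: ls) = pvBlocks pfx ls := by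
  rw [pvBlocks]; simp only [PySem.Str.startswith_eq] at h ⊢; simp [h]

-- re-inserting the stored value is a no-op (keys unique)
theorem pv_insert_getD_self {ν : Type} (d : PySem.Dict String ν) (k : String) (d0 : ν)
    (hnd : d.keys.Nodup) (hc : d.contains k = true) :
    d.insert k (d.getD k d0) = d := by
  apply PySem.Dict.ext
  rw [PySem.Dict.items_insert_of_contains d _ hc]
  conv_rhs => rw [← List.map_id d.items]
  apply List.map_congr_left
  intro p hp
  by_cases hpk : (p.1 == k) = true
  · have hk : p.1 = k := by simpa using hpk
    have h2 : d.getD k d0 = p.2 := by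
      refine PySem.Dict.getD_of_mem_items d ?_ hnd d0
      rw [← hk]; exact hp
    rw [if_pos hpk, h2, ← hk]
    rfl
  · rw [if_neg hpk]
    rfl

-- inner fold preserves Nodup keys
theorem pv_inner_nodup (blks : List (String × List String)) (wd : PySem.Dict String (List String))
    (h : wd.keys.Nodup) : (blks.foldl pvInnerStep wd).keys.Nodup := by
  induction blks generalizing wd with
  | nil => simpa using h
  | cons b bs ih =>
    simp only [List.foldl_cons]
    apply ih
    dsimp only [pvInnerStep]
    by_cases hc : (wd.contains (PySem.Str.strip (PySem.Str.replace b.1 "### " ""))) = true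
    · rw [PySem.Dict.setdefault_of_contains _ _ hc]
      exact PySem.Dict.nodup_keys_insert _ _ _ h
    · rw [PySem.Dict.setdefault_of_not_contains _ _ (by simpa using hc)]
      exact PySem.Dict.nodup_keys_insert _ _ _ (PySem.Dict.nodup_keys_insert _ _ _ h)

-- task segment: lines with no week/initiative heading, truthy week and initiative
theorem pv_tasks (ls : List String)
    (e : PySem.Dict String (PySem.Dict String (List String)))
    (wd : PySem.Dict String (List String)) (wk ini : String) (ts : List String)
    (hW : ∀ l ∈ ls, PySem.Str.startswith l "## Week of " = false)
    (hI : ∀ l ∈ ls, PySem.Str.startswith l "### " = false)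
    (hwk : (wk != "") = true) (hini : (ini != "") = true) :
    ls.foldl pvStepA (e.insert wk (wd.insert ini ts), some wk, some ini)
      = (e.insert wk (wd.insert ini
          (ts ++ ls.filter (fun l => PySem.Str.startswith l "- [x]"))), some wk, some ini) := by
  induction ls generalizing ts with
  | nil => simp
  | cons l ls ih =>
    have hWl := hW l (by simp)
    have hIl := hI l (by simp)
    simp only [PySem.Str.startswith_eq] at hWl hIl
    simp at hWl hIl
    simp only [List.foldl_cons]
    by_cases hT : PySem.Str.startswith l "- [x]" = true
    · have hT' := hT
      simp only [PySem.Str.startswith_eq] at hT'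
      simp at hT'
      rw [show pvStepA (e.insert wk (wd.insert ini ts), some wk, some ini) l
          = (e.insert wk (wd.insert ini (ts ++ [l])), some wk, some ini) by
        unfold pvStepA
        simp [hWl, hIl, hT', pvTruthy, hwk, hini, PySem.Dict.getD_insert_self,
          PySem.Dict.insert_insert_self]]
      rw [ih (ts ++ [l]) (fun x hx => hW x (by simp [hx])) (fun x hx => hI x (by simp [hx]))]
      rw [List.filter_cons_of_pos (by simpa using hT)]
      simp
    · have hT' : PySem.Str.startswith l "- [x]" = false := by simpa using hT
      simp only [PySem.Str.startswith_eq] at hT'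
      simp at hT'
      rw [show pvStepA (e.insert wk (wd.insert ini ts), some wk, some ini) l
          = (e.insert wk (wd.insert ini ts), some wk, some ini) by
        unfold pvStepA
        simp [hWl, hIl, hT', pvTruthy, hwk, hini]]
      rw [ih ts (fun x hx => hW x (by simp [hx])) (fun x hx => hI x (by simp [hx]))]
      rw [List.filter_cons_of_neg (by simpa using hT)]

-- the head of dropWhile fails the predicate
theorem pv_dropWhile_head {α : Type} (p : α → Bool) (ls : List α) (l : α) (rest : List α)
    (h : ls.dropWhile p = l :: rest) : p l = false := by
  induction ls with
  | nil => simp at h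
  | cons x xs ih =>
    rw [List.dropWhile_cons] at h
    by_cases hx : p x = true
    · exact ih (by simpa [hx] using h)
    · simp [hx] at h
      obtain ⟨h1, _⟩ := h
      subst h1
      simpa using hx

-- dropWhile is empty or starts with an element failing the predicate
theorem pv_dropWhile_cases {α : Type} (p : α → Bool) (ls : List α) :
    ls.dropWhile p = [] ∨ ∃ l rest, ls.dropWhile p = l :: rest ∧ p l = false := by
  match h : ls.dropWhile p with
  | [] => exact Or.inl rfl
  | l :: rest => exact Or.inr ⟨l, rest, rfl, pv_dropWhile_head p ls l rest h⟩

-- the body of one week block equals B's inner fold over its initiative blocks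
-- (every '### ' line in ls has a nonempty stripped name, by Pre_)
set_option maxHeartbeats 2000000 in
theorem pv_inner (n : ℕ) : ∀ (ls : List String), ls.length ≤ n →
    (∀ l ∈ ls, PySem.Str.startswith l "## Week of " = false) →
    (∀ l ∈ ls, PySem.Str.startswith l "### " = true →
      PySem.Str.strip (PySem.Str.replace l "### " "") ≠ "") →
    ∀ (e : PySem.Dict String (PySem.Dict String (List String))) (wk : String) (ci : Option String),
    (wk != "") = true → e.contains wk = true → e.keys.Nodup →
    (e.getD wk PySem.Dict.empty).keys.Nodup →
    (pvTruthy ci = false ∨ ls = [] ∨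
      ∃ l rest, ls = l :: rest ∧ PySem.Str.startswith l "### " = true) →
    ∃ ci', ls.foldl pvStepA (e, some wk, ci)
      = (e.insert wk ((pvBlocks "### " ls).foldl pvInnerStep (e.getD wk PySem.Dict.empty)),
         some wk, ci') := by
  induction n with
  | zero =>
    intro ls hlen _ _ e wk ci hwk hc hnd hwd _
    have : ls = [] := List.eq_nil_of_length_eq_zero (Nat.le_zero.mp hlen)
    subst this
    exact ⟨ci, by simp [pvBlocks, pv_insert_getD_self e wk PySem.Dict.empty hnd hc]⟩
  | succ n ih =>
    intro ls hlen hW hPre e wk ci hwk hc hnd hwd hci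
    match ls with
    | [] =>
      exact ⟨ci, by simp [pvBlocks, pv_insert_getD_self e wk PySem.Dict.empty hnd hc]⟩
    | l :: rest =>
      have hWl := hW l (by simp)
      have hrlen : rest.length ≤ n := by simpa using hlen
      by_cases hIl : PySem.Str.startswith l "### " = true
      · -- initiative heading
        set ini := PySem.Str.strip (PySem.Str.replace l "### " "") with hini_def
        have hini : (ini != "") = true := by
          have := hPre l (by simp) hIl
          simpa [hini_def] using this
        set wd := e.getD wk PySem.Dict.empty with hwd_def
        set wd₁ := wd.setdefault ini [] with hwd1_def
        set ts₀ := wd.getD ini [] with hts0_def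
        have hstep : pvStepA (e, some wk, ci) l
            = ((if wd.contains ini then e else e.insert wk (wd.insert ini [])),
               some wk, some ini) := by
          unfold pvStepA
          have hWl' := hWl
          have hIl' := hIl
          simp only [PySem.Str.startswith_eq] at hWl' hIl'
          simp at hWl' hIl'
          simp [hWl', hIl', pvTruthy, hwk, hwd_def, hini_def]
        have he₁ : (if wd.contains ini then e else e.insert wk (wd.insert ini []))
            = e.insert wk wd₁ := by
          by_cases hcont : wd.contains ini = true
          · rw [if_pos hcont, hwd1_def, PySem.Dict.setdefault_of_contains _ _ hcont, hwd_def,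
              pv_insert_getD_self e wk PySem.Dict.empty hnd hc]
          · rw [if_neg hcont, hwd1_def,
              PySem.Dict.setdefault_of_not_contains _ _ (by simpa using hcont)]
        have hwd1ins : wd₁ = wd.insert ini ts₀ := by
          by_cases hcont : wd.contains ini = true
          · rw [hwd1_def, PySem.Dict.setdefault_of_contains _ _ hcont, hts0_def,
              pv_insert_getD_self wd ini [] hwd hcont]
          · rw [hwd1_def, PySem.Dict.setdefault_of_not_contains _ _ (by simpa using hcont),
              hts0_def, PySem.Dict.getD_of_not_contains _ _ (by simpa using hcont)]
        set body := rest.takeWhile (fun x => !PySem.Str.startswith x "### ") with hbody_def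
        set rest' := rest.dropWhile (fun x => !PySem.Str.startswith x "### ") with hrest_def
        have hsplit : rest = body ++ rest' := (List.takeWhile_append_dropWhile).symm
        have hbodyW : ∀ x ∈ body, PySem.Str.startswith x "## Week of " = false := by
          intro x hx
          exact hW x (by simp [hsplit]; exact Or.inr (Or.inl hx))
        have hbodyI : ∀ x ∈ body, PySem.Str.startswith x "### " = false := by
          intro x hx
          have := List.mem_takeWhile_imp hx
          simpa using this
        have hrestW : ∀ x ∈ rest', PySem.Str.startswith x "## Week of " = false := by
          intro x hx
          exact hW x (by simp [hsplit]; exact Or.inr (Or.inr hx))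
        have hrestPre : ∀ x ∈ rest', PySem.Str.startswith x "### " = true →
            PySem.Str.strip (PySem.Str.replace x "### " "") ≠ "" := by
          intro x hx
          exact hPre x (by simp [hsplit]; exact Or.inr (Or.inr hx))
        have hrlen' : rest'.length ≤ n :=
          le_trans (by rw [hrest_def]; exact List.length_dropWhile_le _ _) hrlen
        have hrestHead : rest' = [] ∨
            ∃ l₂ r₂, rest' = l₂ :: r₂ ∧ PySem.Str.startswith l₂ "### " = true := by
          have hcs := pv_dropWhile_cases (fun x => !PySem.Str.startswith x "### ") rest
          rw [← hrest_def] at hcs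
          rcases hcs with h | ⟨l₂, r₂, hEq, hP⟩
          · exact Or.inl h
          · exact Or.inr ⟨l₂, r₂, hEq, by simpa using hP⟩
        have hciR : pvTruthy (some ini) = false ∨ rest' = [] ∨
            ∃ l₂ r₂, rest' = l₂ :: r₂ ∧ PySem.Str.startswith l₂ "### " = true :=
          Or.inr hrestHead
        have hblk : pvBlocks "### " (l :: rest) = (l, body) :: pvBlocks "### " rest' := by
          rw [pvBlocks_cons_pos _ _ _ hIl, ← hbody_def, ← hrest_def]
        -- non-empty initiative name: tasks in the body are appended
        set wd₂ := wd.insert ini (ts₀ ++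
          body.filter (fun x => PySem.Str.startswith x "- [x]")) with hwd2_def
        have hinner : pvInnerStep wd (l, body) = wd₂ := by
          dsimp only [pvInnerStep]
          rw [← hini_def, ← hwd1_def, hwd1ins,
            PySem.Dict.getD_insert_self, PySem.Dict.insert_insert_self]
        obtain ⟨ci', hrec⟩ := ih rest' hrlen' hrestW hrestPre (e.insert wk wd₂) wk (some ini) hwk
          (PySem.Dict.contains_insert_self _ _ _)
          (PySem.Dict.nodup_keys_insert _ _ _ hnd)
          (by rw [PySem.Dict.getD_insert_self]
              exact PySem.Dict.nodup_keys_insert _ _ _ hwd)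
          hciR
        refine ⟨ci', ?_⟩
        rw [hblk]
        conv_rhs => rw [List.foldl_cons, hinner]
        conv_lhs =>
          rw [List.foldl_cons, hstep, he₁, hwd1ins, hsplit, List.foldl_append,
            pv_tasks body e wd wk ini ts₀ hbodyW hbodyI hwk hini, ← hwd2_def, hrec,
            PySem.Dict.insert_insert_self, PySem.Dict.getD_insert_self]
      · -- ordinary line: nothing happens
        have hciF : pvTruthy ci = false := by
          rcases hci with h | hnil | ⟨l₂, r₂, hEq, hI₂⟩
          · exact h
          · simp at hnil
          · cases hEq; exact absurd hI₂ hIl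
        have hstep : pvStepA (e, some wk, ci) l = (e, some wk, ci) := by
          unfold pvStepA
          have hWl' := hWl
          have hIl' : PySem.Str.startswith l "### " = false := by simpa using hIl
          simp only [PySem.Str.startswith_eq] at hWl' hIl'
          simp at hWl' hIl'
          simp [hWl', hIl', hciF]
        simp only [List.foldl_cons, hstep]
        rw [pvBlocks_cons_neg _ _ _ (by simpa using hIl)]
        exact ih rest hrlen (fun x hx => hW x (by simp [hx])) (fun x hx => hPre x (by simp [hx]))
          e wk ci hwk hc hnd hwd (Or.inl hciF)

-- main loop equals B's outer fold over week blocks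
-- (every heading line in ls has a nonempty stripped name, by Pre_)
set_option maxHeartbeats 4000000 in
theorem pv_main (n : ℕ) : ∀ (ls : List String), ls.length ≤ n →
    (∀ l ∈ ls,
      (PySem.Str.startswith l "## Week of " = true →
        PySem.Str.strip (PySem.Str.replace l "## Week of " "") ≠ "") ∧
      (PySem.Str.startswith l "### " = true →
        PySem.Str.strip (PySem.Str.replace l "### " "") ≠ "")) →
    ∀ (e : PySem.Dict String (PySem.Dict String (List String))) (cw ci : Option String),
    (pvTruthy cw = false ∨ ls = [] ∨
      ∃ l rest, ls = l :: rest ∧ PySem.Str.startswith l "## Week of " = true) →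
    e.keys.Nodup → (∀ p ∈ e.items, p.2.keys.Nodup) →
    (ls.foldl pvStepA (e, cw, ci)).1 = (pvBlocks "## Week of " ls).foldl pvOuterStep e := by
  induction n with
  | zero =>
    intro ls hlen _ e cw ci _ _ _
    have : ls = [] := List.eq_nil_of_length_eq_zero (Nat.le_zero.mp hlen)
    subst this
    simp [pvBlocks]
  | succ n ih =>
    intro ls hlen hPre e cw ci hcw hnd hvals
    match ls with
    | [] => simp [pvBlocks]
    | l :: rest =>
      have hrlen : rest.length ≤ n := by simpa using hlen
      by_cases hWl : PySem.Str.startswith l "## Week of " = true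
      · -- week heading
        set wk := PySem.Str.strip (PySem.Str.replace l "## Week of " "") with hwk_def
        have hwk : (wk != "") = true := by
          have := (hPre l (by simp)).1 hWl
          simpa [hwk_def] using this
        have hstep : pvStepA (e, cw, ci) l
            = ((if e.contains wk then e else e.insert wk PySem.Dict.empty), some wk, none) := by
          unfold pvStepA
          have hWl' := hWl
          simp only [PySem.Str.startswith_eq] at hWl'
          simp at hWl'
          simp [hWl', hwk_def]
        set e₁ := e.setdefault wk PySem.Dict.empty with he1_def
        have he₁ : (if e.contains wk then e else e.insert wk PySem.Dict.empty) = e₁ := by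
          by_cases hcont : e.contains wk = true
          · rw [if_pos hcont, he1_def, PySem.Dict.setdefault_of_contains _ _ hcont]
          · rw [if_neg hcont, he1_def,
              PySem.Dict.setdefault_of_not_contains _ _ (by simpa using hcont)]
        set body := rest.takeWhile (fun x => !PySem.Str.startswith x "## Week of ")
          with hbody_def
        set rest' := rest.dropWhile (fun x => !PySem.Str.startswith x "## Week of ")
          with hrest_def
        have hsplit : rest = body ++ rest' := (List.takeWhile_append_dropWhile).symm
        have hrlen' : rest'.length ≤ n :=
          le_trans (by rw [hrest_def]; exact List.length_dropWhile_le _ _) hrlen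
        have hbodyW : ∀ x ∈ body, PySem.Str.startswith x "## Week of " = false := by
          intro x hx
          have := List.mem_takeWhile_imp hx
          simpa using this
        have hbodyPre : ∀ x ∈ body, PySem.Str.startswith x "### " = true →
            PySem.Str.strip (PySem.Str.replace x "### " "") ≠ "" := by
          intro x hx
          exact (hPre x (by simp [hsplit]; exact Or.inr (Or.inl hx))).2
        have hrestPre : ∀ x ∈ rest',
            (PySem.Str.startswith x "## Week of " = true →
              PySem.Str.strip (PySem.Str.replace x "## Week of " "") ≠ "") ∧
            (PySem.Str.startswith x "### " = true →
              PySem.Str.strip (PySem.Str.replace x "### " "") ≠ "") := by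
          intro x hx
          exact hPre x (by simp [hsplit]; exact Or.inr (Or.inr hx))
        have hrestHead : rest' = [] ∨
            ∃ l₂ r₂, rest' = l₂ :: r₂ ∧ PySem.Str.startswith l₂ "## Week of " = true := by
          have hcs := pv_dropWhile_cases (fun x => !PySem.Str.startswith x "## Week of ") rest
          rw [← hrest_def] at hcs
          rcases hcs with h | ⟨l₂, r₂, hEq, hP⟩
          · exact Or.inl h
          · exact Or.inr ⟨l₂, r₂, hEq, by simpa using hP⟩
        have hnd₁ : e₁.keys.Nodup := by
          by_cases hcont : e.contains wk = true
          · rw [he1_def, PySem.Dict.setdefault_of_contains _ _ hcont]; exact hnd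
          · rw [he1_def, PySem.Dict.setdefault_of_not_contains _ _ (by simpa using hcont)]
            exact PySem.Dict.nodup_keys_insert _ _ _ hnd
        have hvals₁ : ∀ p ∈ e₁.items, p.2.keys.Nodup := by
          intro p hp
          by_cases hcont : e.contains wk = true
          · rw [he1_def, PySem.Dict.setdefault_of_contains _ _ hcont] at hp
            exact hvals p hp
          · rw [he1_def, PySem.Dict.setdefault_of_not_contains _ _ (by simpa using hcont)] at hp
            rcases (PySem.Dict.mem_items_insert _ _ _ _).mp hp with h | ⟨h, _⟩
            · rw [h]; exact PySem.Dict.nodup_keys_empty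
            · exact hvals p h
        have hblk : pvBlocks "## Week of " (l :: rest)
            = (l, body) :: pvBlocks "## Week of " rest' := by
          rw [pvBlocks_cons_pos _ _ _ hWl, ← hbody_def, ← hrest_def]
        -- non-empty week name: the body is one inner run
        have hcwk : e₁.contains wk = true := by
          rw [he1_def]
          rw [PySem.Dict.contains_setdefault]
          simp
        have hwd₁ : (e₁.getD wk PySem.Dict.empty).keys.Nodup := by
          by_cases hcont : e.contains wk = true
          · rw [he1_def, PySem.Dict.setdefault_of_contains _ _ hcont]
            rcases hv : e.get? wk with _ | v
            · rw [PySem.Dict.getD_of_get?_eq_none _ _ hv]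
              exact PySem.Dict.nodup_keys_empty
            · rw [PySem.Dict.getD_of_get?_eq_some _ _ hv]
              exact hvals (wk, v) (PySem.Dict.mem_items_of_get?_eq_some _ hv)
          · rw [he1_def, PySem.Dict.setdefault_of_not_contains _ _ (by simpa using hcont),
              PySem.Dict.getD_insert_self]
            exact PySem.Dict.nodup_keys_empty
        obtain ⟨ci', hbodyEq⟩ := pv_inner body.length body le_rfl hbodyW hbodyPre e₁ wk none hwk
          hcwk hnd₁ hwd₁ (Or.inl rfl)
        set X := (pvBlocks "### " body).foldl pvInnerStep (e₁.getD wk PySem.Dict.empty)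
          with hX_def
        have houter : pvOuterStep e (l, body) = e₁.insert wk X := by
          dsimp only [pvOuterStep]
        have hnd₂ : (e₁.insert wk X).keys.Nodup := PySem.Dict.nodup_keys_insert _ _ _ hnd₁
        have hvals₂ : ∀ p ∈ (e₁.insert wk X).items, p.2.keys.Nodup := by
          intro p hp
          rcases (PySem.Dict.mem_items_insert _ _ _ _).mp hp with h | ⟨h, _⟩
          · rw [h, hX_def]
            exact pv_inner_nodup _ _ hwd₁
          · exact hvals₁ p h
        have hciR : pvTruthy (some wk) = false ∨ rest' = [] ∨
            ∃ l₂ r₂, rest' = l₂ :: r₂ ∧ PySem.Str.startswith l₂ "## Week of " = true :=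
          Or.inr hrestHead
        clear_value X body rest' e₁ wk
        rw [hblk]
        conv_rhs => rw [List.foldl_cons, houter]
        conv_lhs => rw [List.foldl_cons, hstep, he₁, hsplit, List.foldl_append, hbodyEq]
        exact ih rest' hrlen' hrestPre (e₁.insert wk X) (some wk) ci' hciR hnd₂ hvals₂
      · -- not a week heading: nothing happens
        have hcwF : pvTruthy cw = false := by
          rcases hcw with h | hnil | ⟨l₂, r₂, hEq, hW₂⟩
          · exact h
          · simp at hnil
          · cases hEq; exact absurd hW₂ hWl
        have hstep : pvStepA (e, cw, ci) l = (e, cw, ci) := by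
          unfold pvStepA
          have hWl' : PySem.Str.startswith l "## Week of " = false := by simpa using hWl
          simp only [PySem.Str.startswith_eq] at hWl'
          simp at hWl'
          simp [hWl', hcwF]
        rw [pvBlocks_cons_neg _ _ _ (by simpa using hWl), List.foldl_cons, hstep]
        exact ih rest hrlen (fun x hx => hPre x (by simp [hx])) e cw ci (Or.inl hcwF) hnd hvals

-- ===== VERDICT (by name: the statement is the Claim_ definition above) =====
theorem parse_logbook_py_spec : Claim_equal_parse_logbook_py := by
  intro content _ hPre
  unfold Spec_parse_logbook_py parse_logbook_py parse_logbook_py_alt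
  have h := pv_main ((PySem.Str.split? content "\n").getD []).length ((PySem.Str.split? content "\n").getD [])
    le_rfl hPre PySem.Dict.empty none none (Or.inl rfl) (by exact PySem.Dict.nodup_keys_empty)
    (by simp [PySem.Dict.empty])
  rw [h]
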